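-- pv_equiv track=rewrite | github.com/qv15mail/super-dev | super_dev/creators/implementation_builder.py | _build_module_requirements
-- ===== SOURCE A (Python) =====
-- def _build_module_requirements(requirements: list[dict]) -> dict[str, list[str]]:
--     module_requirements: dict[str, list[str]] = {}
--     for item in requirements:
--         module = str(item.get("spec_name", "core")).strip() or "core"
--         req_name = str(item.get("req_name", "todo")).strip() or "todo"
--         existing = module_requirements.setdefault(module, [])
--         if req_name not in existing:
--             existing.append(req_name)
--     if not module_requirements:
--         module_requirements["core"] = ["core-flow"]
--     return module_requirements
-- ===== SOURCE B (Python) =====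
-- def _build_module_requirements(requirements: list[dict]) -> dict[str, list[str]]:
--     # Pass 0: normalize every item into a (module, req_name) pair.
--     pairs = [
--         (str(item.get("spec_name", "core")).strip() or "core",
--          str(item.get("req_name", "todo")).strip() or "todo")
--         for item in requirements
--     ]
--     # Pass 1: group all (duplicate-included) req_names under their module.
--     module_map: dict[str, list[str]] = {}
--     for module, req_name in pairs:
--         module_map.setdefault(module, []).append(req_name)
--     # Pass 2: dedup each group preserving first-seen order.
--     result = {module: list(dict.fromkeys(names)) for module, names in module_map.items()}
--     if not result:
--         result = {"core": ["core-flow"]}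
--     return result
-- ===== Notes on version B (the rewrite author's own statement) =====
-- stated objective: alternative
-- what changed: Splits A's single inline membership-checked loop into two passes: pass 1 collects all (duplicate-included) req_names per module, pass 2 dedups each group with dict.fromkeys; same fallback.
import Mathlib
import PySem

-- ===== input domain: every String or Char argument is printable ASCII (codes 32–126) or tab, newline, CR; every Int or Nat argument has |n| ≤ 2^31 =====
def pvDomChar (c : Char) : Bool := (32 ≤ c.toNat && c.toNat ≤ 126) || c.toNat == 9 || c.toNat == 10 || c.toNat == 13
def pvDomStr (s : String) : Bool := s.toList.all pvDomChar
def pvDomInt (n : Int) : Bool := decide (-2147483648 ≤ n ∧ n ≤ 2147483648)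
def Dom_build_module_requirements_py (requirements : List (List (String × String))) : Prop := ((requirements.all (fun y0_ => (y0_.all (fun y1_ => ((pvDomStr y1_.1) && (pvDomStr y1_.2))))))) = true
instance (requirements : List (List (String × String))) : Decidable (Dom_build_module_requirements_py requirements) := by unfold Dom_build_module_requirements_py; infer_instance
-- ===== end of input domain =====

-- B restructures A's single inline membership-checked loop into two passes (collect all names per module, then dedup each group); same normalization and fallback.

-- shared normalization helper: str(item.get(key, dflt)).strip() or dflt
def pvNorm (item : List (String × String)) (key dflt : String) : String :=
  let s := PySem.Str.strip ((PySem.Dict.ofList item).getD key dflt)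
  if s = "" then dflt else s

-- ===== PORT A =====
def build_module_requirements_py (requirements : List (List (String × String))) : List (String × List String) :=
  let m := requirements.foldl (fun d item =>
    let module := pvNorm item "spec_name" "core"
    let req_name := pvNorm item "req_name" "todo"
    let d := d.setdefault module []
    let existing := d.getD module []
    if req_name ∈ existing then d else d.insert module (existing ++ [req_name]))
    PySem.Dict.empty
  (if m.size = 0 then m.insert "core" ["core-flow"] else m).items

-- ===== PORT B =====
def build_module_requirements_py_alt (requirements : List (List (String × String))) : List (String × List String) :=
  let pairs := requirements.map (fun item =>
    (pvNorm item "spec_name" "core", pvNorm item "req_name" "todo"))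
  let mm := pairs.foldl (fun d p => d.modify p.1 [] (· ++ [p.2])) PySem.Dict.empty
  let r := mm.items.foldl (fun r p => r.insert p.1 (PySem.List.dedup p.2)) PySem.Dict.empty
  (if r.size = 0 then [("core", ["core-flow"])] else r.items)

-- ===== PRECONDITION & SPEC =====
def Spec_build_module_requirements_py (requirements : List (List (String × String))) (out : List (String × List String)) : Prop := out = build_module_requirements_py_alt requirements
instance (requirements : List (List (String × String))) (out : List (String × List String)) : Decidable (Spec_build_module_requirements_py requirements out) := by unfold Spec_build_module_requirements_py; infer_instance

-- ===== CLAIM (what is proved, stated in full; the proofs are below) =====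
def Claim_equal_build_module_requirements_py : Prop := ∀ (requirements : List (List (String × String))), Dom_build_module_requirements_py requirements → Spec_build_module_requirements_py requirements (build_module_requirements_py requirements)

-- ===== LEMMAS AND PROOFS =====

-- proof-only helpers: entrywise dedup of a dict's values
def pvF (p : String × List String) : String × List String := (p.1, PySem.List.dedup p.2)
def pvMapD (d : PySem.Dict String (List String)) : PySem.Dict String (List String) :=
  PySem.Dict.mk (d.items.map pvF)

theorem pv_dedup_append (v : List String) (r : String) :
    PySem.List.dedup (v ++ [r]) =
      if r ∈ v then PySem.List.dedup v else PySem.List.dedup v ++ [r] := by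
  rw [PySem.List.dedup_eq_ofList, PySem.Set.ofList_append, PySem.Set.update_cons,
    PySem.Set.update_nil, PySem.List.dedup_eq_ofList]
  by_cases h : r ∈ v
  · simp [PySem.Set.add, PySem.Set.contains, PySem.Set.mem_ofList, h]
  · simp [PySem.Set.add, PySem.Set.contains, PySem.Set.mem_ofList, h]

theorem pv_items_mapD (d : PySem.Dict String (List String)) :
    (pvMapD d).items = d.items.map pvF := rfl

theorem pv_contains_mapD (d : PySem.Dict String (List String)) (k : String) :
    (pvMapD d).contains k = d.contains k := by
  obtain ⟨items⟩ := d
  rw [pvMapD]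
  simp only [PySem.Dict.contains_mk, List.any_map]
  exact PySem.List.any_congr_mem (fun x _ => rfl)

theorem pv_get?_mapD (d : PySem.Dict String (List String)) (k : String) :
    (pvMapD d).get? k = (d.get? k).map PySem.List.dedup := by
  obtain ⟨items⟩ := d
  induction items with
  | nil => simp [pvMapD, PySem.Dict.get?]
  | cons p rest ih =>
    obtain ⟨a, b⟩ := p
    rw [pvMapD] at ih ⊢
    rw [List.map_cons, pvF, PySem.Dict.get?_mk_cons, PySem.Dict.get?_mk_cons]
    by_cases h : (a == k) = true
    · simp [h]
    · simp only [h, Bool.false_eq_true, if_false]; exact ih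

theorem pv_getD_mapD (d : PySem.Dict String (List String)) (k : String) :
    (pvMapD d).getD k [] = PySem.List.dedup (d.getD k []) := by
  rw [PySem.Dict.getD_eq_get?_getD, PySem.Dict.getD_eq_get?_getD, pv_get?_mapD]
  cases d.get? k with
  | none => rfl
  | some v => rfl

-- A's loop body equals entrywise-dedup of B's loop body (on nodup-keyed dicts)
theorem pv_step_comm (d : PySem.Dict String (List String)) (m r : String)
    (hnd : d.keys.Nodup) :
    (if r ∈ ((pvMapD d).setdefault m []).getD m []
     then (pvMapD d).setdefault m []
     else ((pvMapD d).setdefault m []).insert m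
       (((pvMapD d).setdefault m []).getD m [] ++ [r])) =
    pvMapD (d.modify m [] (· ++ [r])) := by
  have hmod : d.modify m [] (· ++ [r]) = d.insert m (d.getD m [] ++ [r]) := rfl
  by_cases h : d.contains m = true
  · -- key already present
    have hc : (pvMapD d).contains m = true := by rw [pv_contains_mapD]; exact h
    rw [hmod]
    rw [PySem.Dict.setdefault_of_contains _ _ hc, pv_getD_mapD]
    set v := d.getD m [] with hv
    have hval : ∀ p ∈ d.items, p.1 = m → p.2 = v := by
      intro p hp hpm
      have := PySem.Dict.get?_of_mem_items d (k := p.1) (v := p.2)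
        (by exact (by cases p; exact hp)) hnd
      rw [hpm] at this
      rw [hv, PySem.Dict.getD_eq_get?_getD, this]; rfl
    apply PySem.Dict.ext
    rw [pv_items_mapD, PySem.Dict.items_insert, if_pos h, List.map_map]
    by_cases hr : r ∈ PySem.List.dedup v
    · rw [if_pos hr, pv_items_mapD]
      apply List.map_congr_left
      intro p hp
      simp only [Function.comp]
      by_cases hpm : (p.1 == m) = true
      · have hpv : p.2 = v := hval p hp (by simpa using hpm)
        have hrv : r ∈ v := (PySem.List.mem_dedup v r).mp hr
        have hde : PySem.List.dedup (v ++ [r]) = PySem.List.dedup v := by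
          rw [pv_dedup_append, if_pos hrv]
        simp only [pvF]
        rw [if_pos hpm, hpv, (by simpa using hpm : p.1 = m)]
        show (m, PySem.List.dedup v) = (m, PySem.List.dedup (v ++ [r]))
        rw [hde]
      · simp only [pvF]
        rw [if_neg hpm]
    · rw [if_neg hr, PySem.Dict.items_insert, if_pos hc, pv_items_mapD, List.map_map]
      apply List.map_congr_left
      intro p hp
      simp only [Function.comp]
      by_cases hpm : (p.1 == m) = true
      · have hpv : p.2 = v := hval p hp (by simpa using hpm)
        have hrv : r ∉ v := fun hin => hr ((PySem.List.mem_dedup v r).mpr hin)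
        simp only [pvF]
        rw [if_pos hpm, if_pos hpm, pv_dedup_append, if_neg hrv]
      · simp only [pvF]
        rw [if_neg hpm, if_neg hpm]
  · -- fresh key
    have h' : d.contains m = false := by simpa using h
    have hc : (pvMapD d).contains m = false := by rw [pv_contains_mapD]; exact h'
    rw [hmod, PySem.Dict.setdefault_of_not_contains _ _ hc]
    have hgd : ((pvMapD d).insert m []).getD m [] = ([] : List String) := by
      rw [PySem.Dict.getD_eq_get?_getD, PySem.Dict.get?_insert_self]; rfl
    rw [hgd, if_neg (List.not_mem_nil), PySem.Dict.insert_insert_self,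
      PySem.Dict.getD_of_not_contains _ _ h']
    apply PySem.Dict.ext
    rw [PySem.Dict.items_insert, if_neg (by simp [hc]), pv_items_mapD, pv_items_mapD,
      PySem.Dict.items_insert, if_neg (by simp [h']), List.map_append]
    rfl

theorem pv_nodup_keys_modify (d : PySem.Dict String (List String)) (m : String)
    (f : List String → List String) (hnd : d.keys.Nodup) :
    (d.modify m [] f).keys.Nodup := by
  rw [PySem.Dict.keys_modify]
  exact PySem.Dict.nodup_keys_insert _ _ _ hnd

-- fold invariant: A's loop over a prefix is the entrywise dedup of B's pass-1 loop
theorem pv_fold_comm (l : List (List (String × String)))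
    (d : PySem.Dict String (List String)) (hnd : d.keys.Nodup) :
    l.foldl (fun d item =>
      let module := pvNorm item "spec_name" "core"
      let req_name := pvNorm item "req_name" "todo"
      let d := d.setdefault module []
      let existing := d.getD module []
      if req_name ∈ existing then d else d.insert module (existing ++ [req_name]))
      (pvMapD d) =
    pvMapD (l.foldl (fun d item =>
      d.modify (pvNorm item "spec_name" "core") [] (· ++ [pvNorm item "req_name" "todo"])) d) := by
  induction l generalizing d with
  | nil => rfl
  | cons item rest ih =>
    simp only [List.foldl_cons]
    rw [pv_step_comm d _ _ hnd]
    exact ih _ (pv_nodup_keys_modify d _ _ hnd)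

theorem pv_nodup_empty : (PySem.Dict.empty : PySem.Dict String (List String)).keys.Nodup := by
  rw [show (PySem.Dict.empty : PySem.Dict String (List String)).keys = [] from rfl]
  exact List.nodup_nil

theorem pv_tail (D : PySem.Dict String (List String)) :
    (if D.size = 0 then D.insert "core" ["core-flow"] else D).items =
      if D.size = 0 then [("core", ["core-flow"])] else D.items := by
  by_cases hs : D.size = 0
  · rw [if_pos hs, if_pos hs]
    have hnil : D.items = [] := List.eq_nil_of_length_eq_zero hs
    have he : D = PySem.Dict.empty := PySem.Dict.ext hnil
    rw [he]
    rfl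
  · rw [if_neg hs, if_neg hs]

theorem pv_main (requirements : List (List (String × String))) :
    build_module_requirements_py requirements = build_module_requirements_py_alt requirements := by
  have h1 : requirements.foldl (fun d item =>
      let module := pvNorm item "spec_name" "core"
      let req_name := pvNorm item "req_name" "todo"
      let d := d.setdefault module []
      let existing := d.getD module []
      if req_name ∈ existing then d else d.insert module (existing ++ [req_name]))
      PySem.Dict.empty =
    pvMapD (requirements.foldl (fun d item =>
      d.modify (pvNorm item "spec_name" "core") [] (· ++ [pvNorm item "req_name" "todo"]))
      PySem.Dict.empty) := pv_fold_comm requirements PySem.Dict.empty pv_nodup_empty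
  have hnd : (requirements.foldl (fun d item =>
      d.modify (pvNorm item "spec_name" "core") [] (· ++ [pvNorm item "req_name" "todo"]))
      PySem.Dict.empty).keys.Nodup :=
    PySem.Dict.nodup_keys_foldl_modify_key requirements
      (fun item => pvNorm item "spec_name" "core") []
      (fun _ item => (· ++ [pvNorm item "req_name" "todo"])) PySem.Dict.empty pv_nodup_empty
  have h2 : (requirements.foldl (fun d item =>
      d.modify (pvNorm item "spec_name" "core") [] (· ++ [pvNorm item "req_name" "todo"]))
      PySem.Dict.empty).items.foldl (fun r p => r.insert p.1 (PySem.List.dedup p.2))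
      PySem.Dict.empty =
    pvMapD (requirements.foldl (fun d item =>
      d.modify (pvNorm item "spec_name" "core") [] (· ++ [pvNorm item "req_name" "todo"]))
      PySem.Dict.empty) := by
    apply PySem.Dict.ext
    rw [PySem.Dict.items_foldl_insert_fresh _ Prod.fst
      (fun p => PySem.List.dedup p.2) PySem.Dict.empty
      (fun _ _ => PySem.Dict.contains_empty _) hnd, pv_items_mapD]
    rfl
  have hA : build_module_requirements_py requirements =
      (if (requirements.foldl (fun d item =>
        let module := pvNorm item "spec_name" "core"
        let req_name := pvNorm item "req_name" "todo"
        let d := d.setdefault module []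
        let existing := d.getD module []
        if req_name ∈ existing then d else d.insert module (existing ++ [req_name]))
        PySem.Dict.empty).size = 0
       then (requirements.foldl (fun d item =>
        let module := pvNorm item "spec_name" "core"
        let req_name := pvNorm item "req_name" "todo"
        let d := d.setdefault module []
        let existing := d.getD module []
        if req_name ∈ existing then d else d.insert module (existing ++ [req_name]))
        PySem.Dict.empty).insert "core" ["core-flow"]
       else (requirements.foldl (fun d item =>
        let module := pvNorm item "spec_name" "core"
        let req_name := pvNorm item "req_name" "todo"
        let d := d.setdefault module []
        let existing := d.getD module []
        if req_name ∈ existing then d else d.insert module (existing ++ [req_name]))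
        PySem.Dict.empty)).items := rfl
  have hB : build_module_requirements_py_alt requirements =
      (if (((requirements.map (fun item =>
        (pvNorm item "spec_name" "core", pvNorm item "req_name" "todo"))).foldl
        (fun d p => d.modify p.1 [] (· ++ [p.2])) PySem.Dict.empty).items.foldl
        (fun r p => r.insert p.1 (PySem.List.dedup p.2)) PySem.Dict.empty).size = 0
       then [("core", ["core-flow"])]
       else (((requirements.map (fun item =>
        (pvNorm item "spec_name" "core", pvNorm item "req_name" "todo"))).foldl
        (fun d p => d.modify p.1 [] (· ++ [p.2])) PySem.Dict.empty).items.foldl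
        (fun r p => r.insert p.1 (PySem.List.dedup p.2)) PySem.Dict.empty).items) := rfl
  have hfold : (requirements.map (fun item =>
      (pvNorm item "spec_name" "core", pvNorm item "req_name" "todo"))).foldl
      (fun d p => d.modify p.1 [] (· ++ [p.2])) PySem.Dict.empty =
    requirements.foldl (fun d item =>
      d.modify (pvNorm item "spec_name" "core") [] (· ++ [pvNorm item "req_name" "todo"]))
      PySem.Dict.empty := by rw [List.foldl_map]
  rw [hA, hB, hfold, h1, h2]
  exact pv_tail _



-- ===== VERDICT (by name: the statement is the Claim_ definition above) =====
theorem build_module_requirements_py_spec : Claim_equal_build_module_requirements_py := by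
  intro requirements _
  exact pv_main requirements
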